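-- pv_equiv track=rewrite | github.com/RaymondCerneyTech/goldevidencebench | src/goldevidencebench/ui_gate.py | _label_match_count
-- ===== SOURCE A (Python) =====
-- def _token_matches(instruction_token: str, label_token: str) -> bool:
--     if instruction_token == label_token:
--         return True
--     if len(instruction_token) < 4 or len(label_token) < 4:
--         return False
--     return instruction_token.startswith(label_token) or label_token.startswith(instruction_token)
--
-- def _label_match_count(instruction_tokens: list[str], label_tokens: set[str]) -> int:
--     if not instruction_tokens or not label_tokens:
--         return 0
--     count = 0
--     for instruction_token in instruction_tokens:
--         if any(_token_matches(instruction_token, label_token) for label_token in label_tokens):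
--             count += 1
--     return count
-- ===== SOURCE B (Python) =====
-- def _label_match_count(instruction_tokens: list[str], label_tokens: set[str]) -> int:
--     # Hash-index approach: one preprocessing pass over the labels builds
--     # (1) the exact-match set, (2) the set of labels of length >= 4, and
--     # (3) the set of all prefixes (length >= 4) of those labels; each
--     # instruction token is then decided by O(len(token)) set lookups,
--     # with no scan over the labels.
--     exact = set(label_tokens)
--     long_labels = {l for l in label_tokens if len(l) >= 4}
--     prefixes = {l[:k] for l in long_labels for k in range(4, len(l) + 1)}
--     count = 0
--     for t in instruction_tokens:
--         if t in exact:
--             count += 1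
--         elif len(t) >= 4 and (t in prefixes or any(t[:k] in long_labels for k in range(4, len(t) + 1))):
--             count += 1
--     return count
-- ===== Notes on version B (the rewrite author's own statement) =====
-- stated objective: faster
-- what changed: Replaces A's per-token linear scan over all labels (prefix-testing each pair) by hash sets built once from the labels (exact labels, long labels, and all length>=4 prefixes of long labels), so each instruction token is decided by O(len(token)) set lookups with no scan over labels.
import Mathlib
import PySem

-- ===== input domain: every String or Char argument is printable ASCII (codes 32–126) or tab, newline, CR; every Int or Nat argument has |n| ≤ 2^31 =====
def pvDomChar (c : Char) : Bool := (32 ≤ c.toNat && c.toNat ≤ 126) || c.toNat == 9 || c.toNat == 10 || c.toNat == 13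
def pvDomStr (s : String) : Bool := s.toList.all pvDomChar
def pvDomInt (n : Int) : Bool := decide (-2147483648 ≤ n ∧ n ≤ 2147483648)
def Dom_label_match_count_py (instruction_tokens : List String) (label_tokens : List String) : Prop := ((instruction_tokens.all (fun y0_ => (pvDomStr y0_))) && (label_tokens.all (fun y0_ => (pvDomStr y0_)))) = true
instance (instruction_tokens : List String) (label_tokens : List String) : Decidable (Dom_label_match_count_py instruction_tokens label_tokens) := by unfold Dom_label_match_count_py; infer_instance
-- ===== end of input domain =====

-- B replaces A's per-token scan over all labels by hash sets built once (labels, long labels,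
-- and all length-≥4 prefixes of long labels), deciding each token by set lookups; same return value.

-- ===== PORT A =====
def token_matches_py (instruction_token : String) (label_token : String) : Bool :=
  if instruction_token == label_token then true
  else if PySem.Str.len instruction_token < 4 || PySem.Str.len label_token < 4 then false
  else PySem.Str.startswith instruction_token label_token ||
       PySem.Str.startswith label_token instruction_token

def label_match_count_py (instruction_tokens : List String) (label_tokens : List String) : Int :=
  if instruction_tokens.isEmpty || label_tokens.isEmpty then 0
  else
    instruction_tokens.foldl
      (fun count t => if label_tokens.any (fun l => token_matches_py t l) then count + 1 else count) 0

-- ===== PORT B =====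
def alt_long_labels (label_tokens : List String) : PySem.Set String :=
  PySem.Set.ofList (label_tokens.filter (fun l => decide (4 ≤ PySem.Str.len l)))

def alt_prefixes (label_tokens : List String) : PySem.Set String :=
  PySem.Set.ofList ((alt_long_labels label_tokens).flatMap (fun l =>
    (PySem.List.pyRange 4 (PySem.Str.len l + 1)).map (fun k => PySem.Str.slice l none (some k))))

def alt_token_hit (t : String) (exact : PySem.Set String) (longL : PySem.Set String)
    (prefixes : PySem.Set String) : Bool :=
  PySem.Set.contains exact t ||
    (decide (4 ≤ PySem.Str.len t) &&
      (PySem.Set.contains prefixes t ||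
        (PySem.List.pyRange 4 (PySem.Str.len t + 1)).any
          (fun k => PySem.Set.contains longL (PySem.Str.slice t none (some k)))))

def label_match_count_py_alt (instruction_tokens : List String) (label_tokens : List String) : Int :=
  let exact := PySem.Set.ofList label_tokens
  let longL := alt_long_labels label_tokens
  let prefixes := alt_prefixes label_tokens
  instruction_tokens.foldl
    (fun count t => if alt_token_hit t exact longL prefixes then count + 1 else count) 0

-- ===== PRECONDITION & SPEC =====
def Spec_label_match_count_py (instruction_tokens : List String) (label_tokens : List String) (out : Int) : Prop := out = label_match_count_py_alt instruction_tokens label_tokens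
instance (instruction_tokens : List String) (label_tokens : List String) (out : Int) : Decidable (Spec_label_match_count_py instruction_tokens label_tokens out) := by unfold Spec_label_match_count_py; infer_instance

-- ===== CLAIM (what is proved, stated in full; the proofs are below) =====
def Claim_equal_label_match_count_py : Prop := ∀ (instruction_tokens : List String) (label_tokens : List String), Dom_label_match_count_py instruction_tokens label_tokens → Spec_label_match_count_py instruction_tokens label_tokens (label_match_count_py instruction_tokens label_tokens)

-- ===== LEMMAS AND PROOFS =====

lemma token_matches_iff (t l : String) :
    token_matches_py t l = true ↔
      t = l ∨ (4 ≤ t.toList.length ∧ 4 ≤ l.toList.length ∧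
        (l.toList <+: t.toList ∨ t.toList <+: l.toList)) := by
  unfold token_matches_py
  have hT : PySem.Str.len t = (t.toList.length : Int) := PySem.Str.len_eq t
  have hL : PySem.Str.len l = (l.toList.length : Int) := PySem.Str.len_eq l
  by_cases h1 : t = l
  · subst h1; simp
  · rw [if_neg (by simpa using h1)]
    by_cases h2 : t.toList.length < 4 ∨ l.toList.length < 4
    · rw [if_pos (by simp only [hT, hL, Bool.or_eq_true, decide_eq_true_eq]; omega)]
      simp only [Bool.false_eq_true, false_iff]
      rintro (heq | ⟨a, b, _⟩)
      · exact h1 heq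
      · omega
    · rw [if_neg (by simp only [hT, hL, Bool.or_eq_true, decide_eq_true_eq]; omega)]
      simp only [Bool.or_eq_true, PySem.Str.startswith_eq, PySem.Chars.startswith_iff]
      constructor
      · intro h; exact Or.inr ⟨by omega, by omega, h⟩
      · rintro (heq | ⟨_, _, h⟩)
        · exact absurd heq h1
        · exact h

lemma slice_take (s : String) (k : Int) (hk : 0 ≤ k) :
    (PySem.Str.slice s none (some k)).toList = s.toList.take k.toNat := by
  rw [PySem.Str.toList_slice, PySem.Chars.slice_eq_listSlice, PySem.List.slice_to _ hk]

lemma hit_eq (labels : List String) (t : String) :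
    alt_token_hit t (PySem.Set.ofList labels) (alt_long_labels labels) (alt_prefixes labels)
      = labels.any (fun l => token_matches_py t l) := by
  rw [Bool.eq_iff_iff]
  simp only [List.any_eq_true, token_matches_iff]
  unfold alt_token_hit alt_prefixes alt_long_labels
  simp only [Bool.or_eq_true, Bool.and_eq_true, List.any_eq_true, decide_eq_true_eq,
    PySem.Set.contains_iff, PySem.Set.mem_ofList, List.mem_flatMap, List.mem_map,
    List.mem_filter, PySem.List.mem_pyRange_one, PySem.Str.len_eq]
  constructor
  · rintro (hmem | ⟨hlen, hpref | hscan⟩)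
    · exact ⟨t, hmem, Or.inl rfl⟩
    · obtain ⟨l, ⟨hl, hllen⟩, k, ⟨hk4, hkle⟩, heq⟩ := hpref
      refine ⟨l, hl, Or.inr ⟨by exact_mod_cast hlen, by exact_mod_cast hllen, Or.inr ?_⟩⟩
      have htl : t.toList = l.toList.take k.toNat := by
        rw [← heq, slice_take l k (by omega)]
      rw [htl]; exact List.take_prefix _ _
    · obtain ⟨k, ⟨hk4, hkle⟩, hslmem, hsllen⟩ := hscan
      refine ⟨_, hslmem, Or.inr ⟨by exact_mod_cast hlen, by exact_mod_cast hsllen, Or.inl ?_⟩⟩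
      rw [slice_take t k (by omega)]; exact List.take_prefix _ _
  · rintro ⟨l, hl, heq | ⟨hlt, hll, hpre | hpre⟩⟩
    · exact Or.inl (heq ▸ hl)
    · -- l is a prefix of t: found by the scan over t\'s own prefixes
      have hksl : PySem.Str.slice t none (some (l.toList.length : Int)) = l := by
        apply String.toList_inj.mp
        rw [slice_take t _ (by omega)]
        simp only [Int.toNat_natCast]
        exact (List.prefix_iff_eq_take.mp hpre).symm
      refine Or.inr ⟨by exact_mod_cast hlt, Or.inr
        ⟨(l.toList.length : Int), ⟨by exact_mod_cast hll, ?_⟩, ?_, ?_⟩⟩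
      · have := hpre.length_le; omega
      · rw [hksl]; exact hl
      · rw [hksl]; exact_mod_cast hll
    · -- t is a prefix of l: t is in the prefix set
      have hksl : PySem.Str.slice l none (some (t.toList.length : Int)) = t := by
        apply String.toList_inj.mp
        rw [slice_take l _ (by omega)]
        simp only [Int.toNat_natCast]
        exact (List.prefix_iff_eq_take.mp hpre).symm
      refine Or.inr ⟨by exact_mod_cast hlt, Or.inl
        ⟨l, ⟨hl, by exact_mod_cast hll⟩, (t.toList.length : Int), ⟨by exact_mod_cast hlt, ?_⟩, hksl⟩⟩
      have := hpre.length_le; omega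

-- ===== VERDICT (by name: the statement is the Claim_ definition above) =====
theorem label_match_count_py_spec : Claim_equal_label_match_count_py := by
  intro its lts _
  unfold Spec_label_match_count_py label_match_count_py label_match_count_py_alt
  rw [PySem.List.foldl_count_if, PySem.List.foldl_count_if]
  have hcount : its.countP (fun t => alt_token_hit t (PySem.Set.ofList lts)
      (alt_long_labels lts) (alt_prefixes lts))
      = its.countP (fun t => lts.any (fun l => token_matches_py t l)) :=
    List.countP_congr (fun t _ => by rw [hit_eq])
  by_cases h : (its.isEmpty || lts.isEmpty) = true
  · rw [if_pos h]
    rcases Bool.or_eq_true _ _ |>.mp h with h | h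
    · rw [List.isEmpty_iff.mp h]; simp
    · have he := List.isEmpty_iff.mp h
      subst he
      rw [hcount]
      simp
  · rw [if_neg h, hcount]
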